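-- pv_equiv track=rewrite | github.com/blainecain/cisc-121-linear-search-visualizer | app.py | linear_search_steps
-- ===== SOURCE A (Python) =====
-- def linear_search_steps(arr, target_value):
--     steps = []
--     diagrams = []
--
--     for index in range(len(arr)):
--         steps.append(f"Checking index {index}: Value = {arr[index]}")
--         diagrams.append(create_list_diagram(arr, current_index=index))
--
--         if arr[index] == target_value:
--             steps.append(f"The target, {target_value}, was found at index {index}!")
--             diagrams.append(create_list_diagram(arr, current_index=index))
--             return "\n".join(steps), diagrams[-1]
--
--     steps.append(f"The target, {target_value}, was not found in the list.")
--     diagrams.append(create_list_diagram(arr, current_index=None))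
--     return "\n".join(steps), diagrams[-1]
--
-- def create_list_diagram(arr, current_index=None):
--     html = ""
--     for i, val in enumerate(arr):
--         if i == current_index:
--             # Highlight the current index
--             html += f"<div style='display:inline-block; padding:10px; margin:5px; border:2px solid red; background-color:#ffe6e6;'>{val}</div>"
--         else:
--             html += f"<div style='display:inline-block; padding:10px; margin:5px; border:1px solid black;'>{val}</div>"
--     return html
-- ===== SOURCE B (Python) =====
-- def linear_search_steps(arr, target_value):
--     # Search first, render once afterwards (search and presentation separated).
--     try:
--         idx = arr.index(target_value)
--     except ValueError:
--         idx = None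
--
--     if idx is None:
--         steps = [f"Checking index {i}: Value = {v}" for i, v in enumerate(arr)]
--         steps.append(f"The target, {target_value}, was not found in the list.")
--     else:
--         steps = [f"Checking index {i}: Value = {v}" for i, v in enumerate(arr[:idx + 1])]
--         steps.append(f"The target, {target_value}, was found at index {idx}!")
--
--     cells = [
--         (f"<div style='display:inline-block; padding:10px; margin:5px; border:2px solid red; background-color:#ffe6e6;'>{v}</div>"
--          if i == idx else
--          f"<div style='display:inline-block; padding:10px; margin:5px; border:1px solid black;'>{v}</div>")
--         for i, v in enumerate(arr)
--     ]
--     return "\n".join(steps), "".join(cells)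
-- ===== Notes on version B (the rewrite author's own statement) =====
-- stated objective: alternative
-- what changed: B separates search from rendering: it locates the target once with arr.index (try/except for the not-found case), then builds the step lines and the single returned diagram in independent render passes, instead of A's single loop that interleaves searching, message building and re-rendering a diagram at every index.
import Mathlib
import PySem

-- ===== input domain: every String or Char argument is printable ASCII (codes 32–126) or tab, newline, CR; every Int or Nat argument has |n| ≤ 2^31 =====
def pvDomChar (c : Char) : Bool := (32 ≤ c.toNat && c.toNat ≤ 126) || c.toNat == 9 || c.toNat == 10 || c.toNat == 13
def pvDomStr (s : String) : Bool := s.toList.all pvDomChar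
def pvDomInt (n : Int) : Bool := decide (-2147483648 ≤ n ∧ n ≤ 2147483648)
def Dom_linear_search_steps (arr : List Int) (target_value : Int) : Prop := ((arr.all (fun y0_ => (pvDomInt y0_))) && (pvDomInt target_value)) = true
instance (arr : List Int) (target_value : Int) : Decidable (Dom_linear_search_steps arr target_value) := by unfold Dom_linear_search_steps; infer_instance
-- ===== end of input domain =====

-- B separates search from rendering: it finds the target position with arr.index (try/except),
-- then builds the step lines and the single diagram in independent render passes (objective: alternative decomposition).


-- ===== PORT A =====

/-- A's helper `create_list_diagram`: html accumulated by `+=` over `enumerate(arr)`. -/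
def create_list_diagram (arr : List Int) (current_index : Option Int) : String :=
  (PySem.List.enumerate arr).foldl (fun html p =>
    if some p.1 = current_index then
      html ++ ("<div style='display:inline-block; padding:10px; margin:5px; border:2px solid red; background-color:#ffe6e6;'>" ++ PySem.Int.toStr p.2 ++ "</div>")
    else
      html ++ ("<div style='display:inline-block; padding:10px; margin:5px; border:1px solid black;'>" ++ PySem.Int.toStr p.2 ++ "</div>")) ""

/-- A's `for index in range(len(arr))` loop with early return, carrying `steps` and `diagrams`. -/
def pvLoopA (arr : List Int) (target_value : Int) (steps diagrams : List String) (index : Nat) : String × String :=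
  if h : index < arr.length then
    let steps := steps ++ ["Checking index " ++ PySem.Int.toStr (Int.ofNat index) ++ ": Value = " ++ PySem.Int.toStr arr[index]]
    let diagrams := diagrams ++ [create_list_diagram arr (some (Int.ofNat index))]
    if arr[index] = target_value then
      let steps := steps ++ ["The target, " ++ PySem.Int.toStr target_value ++ ", was found at index " ++ PySem.Int.toStr (Int.ofNat index) ++ "!"]
      let diagrams := diagrams ++ [create_list_diagram arr (some (Int.ofNat index))]
      (PySem.Str.join "\n" steps, PySem.List.pyGetD diagrams (-1) "")
    else
      pvLoopA arr target_value steps diagrams (index + 1)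
  else
    let steps := steps ++ ["The target, " ++ PySem.Int.toStr target_value ++ ", was not found in the list."]
    let diagrams := diagrams ++ [create_list_diagram arr none]
    (PySem.Str.join "\n" steps, PySem.List.pyGetD diagrams (-1) "")
termination_by arr.length - index

def linear_search_steps (arr : List Int) (target_value : Int) : String × String :=
  pvLoopA arr target_value [] [] 0

-- ===== PORT B =====

/-- B's check-line comprehension body. -/
def pvCheckLine (p : Int × Int) : String :=
  "Checking index " ++ PySem.Int.toStr p.1 ++ ": Value = " ++ PySem.Int.toStr p.2

/-- B's diagram-cell comprehension body. -/
def pvCell (idx : Option Int) (p : Int × Int) : String :=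
  if some p.1 = idx then
    "<div style='display:inline-block; padding:10px; margin:5px; border:2px solid red; background-color:#ffe6e6;'>" ++ PySem.Int.toStr p.2 ++ "</div>"
  else
    "<div style='display:inline-block; padding:10px; margin:5px; border:1px solid black;'>" ++ PySem.Int.toStr p.2 ++ "</div>"

def linear_search_steps_alt (arr : List Int) (target_value : Int) : String × String :=
  let idx : Option Int := (PySem.List.index? arr target_value).map Int.ofNat
  let steps : List String :=
    match idx with
    | none => ((PySem.List.enumerate arr).map pvCheckLine)
        ++ ["The target, " ++ PySem.Int.toStr target_value ++ ", was not found in the list."]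
    | some k => ((PySem.List.enumerate (PySem.List.slice arr none (some (k + 1)))).map pvCheckLine)
        ++ ["The target, " ++ PySem.Int.toStr target_value ++ ", was found at index " ++ PySem.Int.toStr k ++ "!"]
  let cells : List String := (PySem.List.enumerate arr).map (pvCell idx)
  (PySem.Str.join "\n" steps, PySem.Str.join "" cells)

-- ===== PRECONDITION & SPEC =====
def Spec_linear_search_steps (arr : List Int) (target_value : Int) (out : String × String) : Prop := out = linear_search_steps_alt arr target_value
instance (arr : List Int) (target_value : Int) (out : String × String) : Decidable (Spec_linear_search_steps arr target_value out) := by unfold Spec_linear_search_steps; infer_instance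

-- ===== CLAIM (what is proved, stated in full; the proofs are below) =====
def Claim_equal_linear_search_steps : Prop := ∀ (arr : List Int) (target_value : Int), Dom_linear_search_steps arr target_value → Spec_linear_search_steps arr target_value (linear_search_steps arr target_value)

-- ===== LEMMAS AND PROOFS =====

theorem pv_intersperse_flatten (a : List Char) (l : List (List Char)) :
    (List.intersperse [] (a :: l)).flatten = a ++ (List.intersperse [] l).flatten := by
  cases l <;> simp

theorem pv_join_empty_cons (a : String) (l : List String) :
    PySem.Str.join "" (a :: l) = a ++ PySem.Str.join "" l := by
  apply String.toList_inj.mp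
  simp [PySem.Str.join, PySem.Chars.join, List.intercalate, pv_intersperse_flatten]

theorem pv_join_empty_nil : PySem.Str.join "" ([] : List String) = "" := by
  apply String.toList_inj.mp
  simp [PySem.Str.join, PySem.Chars.join, List.intercalate]

theorem pv_foldl_append_join (f : Int × Int → String) (l : List (Int × Int)) (s : String) :
    l.foldl (fun h x => h ++ f x) s = s ++ PySem.Str.join "" (l.map f) := by
  induction l generalizing s with
  | nil => simp [pv_join_empty_nil]
  | cons x xs ih => simp only [List.foldl_cons, List.map_cons, ih, pv_join_empty_cons]; simp [String.append_assoc]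

theorem pv_enumerate_take (xs : List Int) (n : Nat) (s : Int) :
    (PySem.List.enumerate xs s).take n = PySem.List.enumerate (xs.take n) s := by
  induction xs generalizing s n with
  | nil => simp [PySem.List.enumerate_nil]
  | cons x xs ih =>
    cases n with
    | zero => simp [PySem.List.enumerate_nil]
    | succ m => simp [PySem.List.enumerate_cons, ih]

theorem diagram_eq (arr : List Int) (idx : Option Int) :
    create_list_diagram arr idx = PySem.Str.join "" ((PySem.List.enumerate arr).map (pvCell idx)) := by
  unfold create_list_diagram
  have hbody : (fun (html : String) (p : Int × Int) =>
      if some p.1 = idx then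
        html ++ ("<div style='display:inline-block; padding:10px; margin:5px; border:2px solid red; background-color:#ffe6e6;'>" ++ PySem.Int.toStr p.2 ++ "</div>")
      else
        html ++ ("<div style='display:inline-block; padding:10px; margin:5px; border:1px solid black;'>" ++ PySem.Int.toStr p.2 ++ "</div>"))
      = fun html p => html ++ pvCell idx p := by
    funext html p
    by_cases h : some p.1 = idx <;> simp [pvCell, h]
  rw [hbody, pv_foldl_append_join]
  simp

theorem loopA_eq (arr : List Int) (target_value : Int) :
    ∀ index steps diagrams, index ≤ arr.length →
    pvLoopA arr target_value steps diagrams index =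
    match PySem.List.index? (arr.drop index) target_value with
    | some k =>
        (PySem.Str.join "\n" (steps ++ (((PySem.List.enumerate (arr.drop index) (Int.ofNat index)).take (k+1)).map pvCheckLine
           ++ ["The target, " ++ PySem.Int.toStr target_value ++ ", was found at index " ++ PySem.Int.toStr (Int.ofNat (index + k)) ++ "!"])),
         create_list_diagram arr (some (Int.ofNat (index + k))))
    | none =>
        (PySem.Str.join "\n" (steps ++ ((PySem.List.enumerate (arr.drop index) (Int.ofNat index)).map pvCheckLine
           ++ ["The target, " ++ PySem.Int.toStr target_value ++ ", was not found in the list."])),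
         create_list_diagram arr none) := by
  suffices H : ∀ (n index : Nat), arr.length - index ≤ n → ∀ steps diagrams, index ≤ arr.length →
      pvLoopA arr target_value steps diagrams index =
      match PySem.List.index? (arr.drop index) target_value with
      | some k =>
          (PySem.Str.join "\n" (steps ++ (((PySem.List.enumerate (arr.drop index) (Int.ofNat index)).take (k+1)).map pvCheckLine
             ++ ["The target, " ++ PySem.Int.toStr target_value ++ ", was found at index " ++ PySem.Int.toStr (Int.ofNat (index + k)) ++ "!"])),
           create_list_diagram arr (some (Int.ofNat (index + k))))
      | none =>
          (PySem.Str.join "\n" (steps ++ ((PySem.List.enumerate (arr.drop index) (Int.ofNat index)).map pvCheckLine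
             ++ ["The target, " ++ PySem.Int.toStr target_value ++ ", was not found in the list."])),
           create_list_diagram arr none) by
    intro index steps diagrams hle
    exact H (arr.length - index) index (le_refl _) steps diagrams hle
  intro n
  induction n with
  | zero =>
    intro index hn steps diagrams hle
    have hix : index = arr.length := by omega
    rw [pvLoopA]
    have h : ¬ index < arr.length := by omega
    simp only [h, dite_false]
    have hdrop : arr.drop index = [] := List.drop_eq_nil_of_le (by omega)
    rw [hdrop]
    simp [PySem.List.enumerate_nil, PySem.List.index?, PySem.List.pyGetD_neg_one_append_singleton]
  | succ n ih => ?_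
  intro index hn steps diagrams hle
  rw [pvLoopA]
  by_cases h : index < arr.length
  · simp only [h, dite_true]
    have hdrop : arr.drop index = arr[index] :: arr.drop (index + 1) := List.drop_eq_getElem_cons h
    by_cases heq : arr[index] = target_value
    · simp only [heq, if_true]
      rw [hdrop]
      rw [heq]
      rw [show PySem.List.index? (target_value :: arr.drop (index + 1)) target_value = some 0 from
        PySem.List.index?_cons_self _ _]
      simp only [PySem.List.enumerate_cons, List.take_succ_cons, List.take_zero, List.map_cons,
        List.map_nil, PySem.List.pyGetD_neg_one_append_singleton]
      simp [pvCheckLine]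
    · simp only [heq, if_false]
      rw [ih (index + 1) (by omega) (steps ++ _) (diagrams ++ _) (by omega)]
      rw [hdrop, PySem.List.index?_cons_of_ne _ heq]
      cases hidx : PySem.List.index? (arr.drop (index + 1)) target_value with
      | none =>
        simp only [Option.map_none]
        simp only [PySem.List.enumerate_cons, List.map_cons]
        simp [pvCheckLine]
      | some k =>
        simp only [Option.map_some]
        have h1 : index + 1 + k = index + (k + 1) := by omega
        simp only [PySem.List.enumerate_cons, List.take_succ_cons, List.map_cons, h1]
        simp [pvCheckLine]
  · simp only [h, dite_false]
    have hdrop : arr.drop index = [] := List.drop_eq_nil_of_le (by omega)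
    rw [hdrop]
    simp [PySem.List.enumerate_nil, PySem.List.index?, PySem.List.pyGetD_neg_one_append_singleton]

-- ===== VERDICT (by name: the statement is the Claim_ definition above) =====
theorem linear_search_steps_spec : Claim_equal_linear_search_steps := by
  intro arr target_value _
  unfold Spec_linear_search_steps linear_search_steps linear_search_steps_alt
  rw [loopA_eq arr target_value 0 [] [] (by omega)]
  simp only [List.drop_zero]
  cases hidx : PySem.List.index? arr target_value with
  | none => simp [diagram_eq]
  | some k =>
    simp only [Option.map_some]
    have hk : (Int.ofNat k + 1) = ((k + 1 : Nat) : Int) := by simp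
    rw [hk, PySem.List.slice_to_natCast, ← pv_enumerate_take]
    simp [diagram_eq]
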